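-- pv_equiv track=rewrite | github.com/saketmugunda123/Engineering-102-Labs | word_puzzle.py | is_valid_guess
-- ===== SOURCE A (Python) =====
-- def get_valid_letters(string):
--   outcome = []
--   for i in range(len(string)):
--     if (string[i] in 'ABCDEFGHIJKLMNOPQRSTUVWXYZ'):
--       if (not (string[i] in outcome)):
--         outcome.append(string[i])
--   outcomeString = ''.join(outcome)
--
--   return outcomeString
--
-- def is_valid_guess(uniqueString, guess):
--   if((len(guess) != 10) or (len(uniqueString) != 10)):
--     return False
--   if get_valid_letters(guess) != guess:
--     return False
--
--   #represents the list of unique letters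
--   uniList = []
--   for i in guess:
--     if ((i in uniqueString) and (i not in uniList)):
--       uniList.append(i)
--     else:
--       return False
--   return True
-- ===== SOURCE B (Python) =====
-- def is_valid_guess(uniqueString, guess):
--     if len(guess) != 10 or len(uniqueString) != 10:
--         return False
--     return (all(c in 'ABCDEFGHIJKLMNOPQRSTUVWXYZ' for c in guess)
--             and len(set(guess)) == 10
--             and set(guess) <= set(uniqueString))
-- ===== Notes on version B (the rewrite author's own statement) =====
-- stated objective: simpler
-- what changed: Replaces A's order-preserving filtered-string rebuild (get_valid_letters + string equality) and its stateful membership/uniList loop with three direct set-based predicates: all-uppercase, len(set(guess))==10, and set(guess) <= set(uniqueString).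
import Mathlib
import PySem

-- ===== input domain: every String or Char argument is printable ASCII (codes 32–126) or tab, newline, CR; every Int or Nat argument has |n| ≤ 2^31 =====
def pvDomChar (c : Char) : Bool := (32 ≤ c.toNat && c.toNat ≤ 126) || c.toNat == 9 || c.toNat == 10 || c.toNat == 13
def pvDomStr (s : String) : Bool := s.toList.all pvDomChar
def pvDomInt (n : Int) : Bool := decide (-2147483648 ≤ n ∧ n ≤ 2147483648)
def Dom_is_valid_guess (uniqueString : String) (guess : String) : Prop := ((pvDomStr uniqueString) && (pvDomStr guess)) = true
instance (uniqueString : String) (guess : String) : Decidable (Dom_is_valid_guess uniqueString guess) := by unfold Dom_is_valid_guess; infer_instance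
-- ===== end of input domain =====

-- One honest line: B replaces A's filtered-string rebuild + stateful uniqueness loop with three
-- direct set-based predicate checks (same return value; simpler decomposition, no speed claim).

-- ===== PORT A =====
-- outcome accumulates first occurrences of uppercase letters, in order; ''.join → String.ofList
def get_valid_letters (string : String) : String :=
  let outcome := string.toList.foldl
    (fun outcome ch =>
      if ch ∈ "ABCDEFGHIJKLMNOPQRSTUVWXYZ".toList then
        if ¬ (ch ∈ outcome) then outcome ++ [ch] else outcome
      else outcome) ([] : List Char)
  String.ofList outcome

-- the second loop of A: early 'return False' becomes structural recursion returning Bool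
def uniLoop (uniq : List Char) (uniList : List Char) : List Char → Bool
  | [] => true
  | c :: rest => if c ∈ uniq ∧ c ∉ uniList then uniLoop uniq (uniList ++ [c]) rest else false

def is_valid_guess (uniqueString : String) (guess : String) : Bool :=
  if guess.toList.length ≠ 10 ∨ uniqueString.toList.length ≠ 10 then false
  else if get_valid_letters guess ≠ guess then false
  else uniLoop uniqueString.toList [] guess.toList

-- ===== PORT B =====
def is_valid_guess_alt (uniqueString : String) (guess : String) : Bool :=
  if guess.toList.length ≠ 10 ∨ uniqueString.toList.length ≠ 10 then false
  else
    let g : PySem.Set Char := PySem.Set.ofList guess.toList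
    guess.toList.all (fun c => decide (c ∈ "ABCDEFGHIJKLMNOPQRSTUVWXYZ".toList))
      && (PySem.Set.len g == 10)
      && PySem.Set.issubset g (PySem.Set.ofList uniqueString.toList)

-- ===== PRECONDITION & SPEC =====
def Spec_is_valid_guess (uniqueString : String) (guess : String) (out : Bool) : Prop := out = is_valid_guess_alt uniqueString guess
instance (uniqueString : String) (guess : String) (out : Bool) : Decidable (Spec_is_valid_guess uniqueString guess out) := by unfold Spec_is_valid_guess; infer_instance

-- ===== CLAIM (what is proved, stated in full; the proofs are below) =====
def Claim_equal_is_valid_guess : Prop := ∀ (uniqueString : String) (guess : String), Dom_is_valid_guess uniqueString guess → Spec_is_valid_guess uniqueString guess (is_valid_guess uniqueString guess)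

-- ===== LEMMAS AND PROOFS =====

-- the fold step of get_valid_letters, named for the lemmas
def gvlStep (outcome : List Char) (ch : Char) : List Char :=
  if ch ∈ "ABCDEFGHIJKLMNOPQRSTUVWXYZ".toList then
    if ¬ (ch ∈ outcome) then outcome ++ [ch] else outcome
  else outcome

theorem gvl_len : ∀ (cs acc : List Char), (List.foldl gvlStep acc cs).length ≤ acc.length + cs.length := by
  intro cs
  induction cs with
  | nil => intro acc; simp
  | cons c rest ih =>
    intro acc
    simp only [List.foldl_cons, gvlStep]
    split_ifs <;> refine le_trans (ih _) (by simp; try omega)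

theorem gvl_eq_iff : ∀ (cs acc : List Char),
    List.foldl gvlStep acc cs = acc ++ cs ↔
      ((∀ c ∈ cs, c ∈ "ABCDEFGHIJKLMNOPQRSTUVWXYZ".toList) ∧ cs.Nodup ∧ ∀ c ∈ cs, c ∉ acc) := by
  intro cs
  induction cs with
  | nil => intro acc; simp
  | cons c rest ih =>
    intro acc
    simp only [List.foldl_cons]
    by_cases hup : c ∈ "ABCDEFGHIJKLMNOPQRSTUVWXYZ".toList
    · by_cases hacc : c ∈ acc
      · have hlen := gvl_len rest acc
        simp only [gvlStep, hup, hacc, if_true, if_false, not_true, ite_self]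
        constructor
        · intro h
          exfalso
          have : (List.foldl gvlStep acc rest).length = (acc ++ c :: rest).length := by rw [h]
          simp at this; omega
        · rintro ⟨-, -, hdisj⟩; exact absurd hacc (hdisj c (by simp))
      · simp only [gvlStep, hup, hacc, not_false_iff, if_true]
        have : acc ++ c :: rest = (acc ++ [c]) ++ rest := by simp
        rw [this, ih (acc ++ [c])]
        constructor
        · rintro ⟨hU, hN, hD⟩
          refine ⟨?_, ?_, ?_⟩
          · intro x hx
            rcases List.mem_cons.mp hx with hx | hx
            · exact hx ▸ hup
            · exact hU x hx
          · refine List.nodup_cons.mpr ⟨?_, hN⟩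
            intro hc; have := hD c hc; simp at this
          · intro x hx
            rcases List.mem_cons.mp hx with hx | hx
            · exact hx ▸ hacc
            · have := hD x hx; simp at this; exact this.1
        · rintro ⟨hU, hN, hD⟩
          simp only [List.nodup_cons] at hN
          refine ⟨fun x hx => hU x (by simp [hx]), hN.2, ?_⟩
          intro x hx
          simp only [List.mem_append, List.mem_singleton]
          push_neg
          exact ⟨hD x (by simp [hx]), fun h => hN.1 (h ▸ hx)⟩
    · have hlen := gvl_len rest acc
      simp only [gvlStep, hup, if_false]
      constructor
      · intro h
        exfalso
        have : (List.foldl gvlStep acc rest).length = (acc ++ c :: rest).length := by rw [h]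
        simp at this; omega
      · rintro ⟨hU, -, -⟩; exact absurd (hU c (by simp)) hup

theorem uniLoop_eq_all : ∀ (cs : List Char) (uniq acc : List Char),
    cs.Nodup → (∀ c ∈ cs, c ∉ acc) →
    (uniLoop uniq acc cs = cs.all (fun c => decide (c ∈ uniq))) := by
  intro cs
  induction cs with
  | nil => intro uniq acc _ _; simp [uniLoop]
  | cons c rest ih =>
    intro uniq acc hN hD
    simp only [List.nodup_cons] at hN
    by_cases hu : c ∈ uniq
    · have hc : c ∉ acc := hD c (by simp)
      simp only [uniLoop, hu, hc, not_false_iff, and_true, if_true, List.all_cons, decide_eq_true hu, Bool.true_and]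
      refine ih uniq (acc ++ [c]) hN.2 ?_
      intro x hx
      simp only [List.mem_append, List.mem_singleton]
      push_neg
      exact ⟨hD x (by simp [hx]), fun h => hN.1 (h ▸ hx)⟩
    · simp [uniLoop, hu]

theorem setfold_len_le : ∀ (cs : List Char) (s : List Char),
    (List.foldl PySem.Set.add s cs).length ≤ s.length + cs.length := by
  intro cs
  induction cs with
  | nil => intro s; simp
  | cons c rest ih =>
    intro s
    simp only [List.foldl_cons, PySem.Set.add]
    split_ifs <;> refine le_trans (ih _) (by simp; try omega)

theorem setfold_len_eq : ∀ (cs : List Char) (s : List Char),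
    (List.foldl PySem.Set.add s cs).length = s.length + cs.length → cs.Nodup := by
  intro cs
  induction cs with
  | nil => intro s _; simp
  | cons c rest ih =>
    intro s h
    simp only [List.foldl_cons, PySem.Set.add] at h
    by_cases hc : PySem.Set.contains s c = true
    · rw [if_pos hc] at h
      have := setfold_len_le rest s
      simp at h; omega
    · rw [if_neg hc] at h
      have hrest : rest.Nodup := ih (s ++ [c]) (by simp at h ⊢; omega)
      -- c ∉ rest: otherwise the fold over s ++ [c] would skip c once more
      by_cases hcr : c ∈ rest
      · exfalso
        -- split rest at the first occurrence of c
        obtain ⟨l1, l2, rfl⟩ := List.mem_iff_append.mp hcr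
        have h1 : (List.foldl PySem.Set.add (s ++ [c]) l1).length ≤ (s ++ [c]).length + l1.length :=
          setfold_len_le l1 (s ++ [c])
        have hmem : c ∈ List.foldl PySem.Set.add (s ++ [c]) l1 := by
          have : ∀ (l : List Char) (t : List Char), c ∈ t → c ∈ List.foldl PySem.Set.add t l := by
            intro l
            induction l with
            | nil => intro t ht; simpa using ht
            | cons x xs ihx =>
              intro t ht
              simp only [List.foldl_cons, PySem.Set.add]
              split_ifs with hx
              · exact ihx t ht
              · exact ihx _ (by simp [ht])
          exact this l1 (s ++ [c]) (by simp)
        have hcontains : PySem.Set.contains (List.foldl PySem.Set.add (s ++ [c]) l1) c = true := by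
          simpa [PySem.Set.contains] using hmem
        rw [List.foldl_append, List.foldl_cons, PySem.Set.add, if_pos hcontains] at h
        have h2 := setfold_len_le l2 (List.foldl PySem.Set.add (s ++ [c]) l1)
        simp at h h1 h2; omega
      · simp [List.nodup_cons, hcr, hrest]
  
-- characterization of port A
theorem isvg_true_iff (u g : String) :
    is_valid_guess u g = true ↔
      (g.toList.length = 10 ∧ u.toList.length = 10 ∧
       (∀ c ∈ g.toList, c ∈ "ABCDEFGHIJKLMNOPQRSTUVWXYZ".toList) ∧ g.toList.Nodup ∧
       ∀ c ∈ g.toList, c ∈ u.toList) := by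
  unfold is_valid_guess
  split_ifs with hlen hne
  · simp only [Bool.false_eq_true, false_iff]; tauto
  · -- get_valid_letters g ≠ g
    push_neg at hlen
    simp only [Bool.false_eq_true, false_iff]
    rintro ⟨-, -, hU, hN, -⟩
    apply hne
    have h1 : List.foldl gvlStep [] g.toList = [] ++ g.toList :=
      (gvl_eq_iff g.toList []).mpr ⟨hU, hN, by simp⟩
    calc get_valid_letters g = String.ofList (List.foldl gvlStep [] g.toList) := rfl
      _ = g := by rw [h1]; simpa using (String.ofList_toList (s := g))
  · push_neg at hlen hne
    have hgv : List.foldl gvlStep [] g.toList = [] ++ g.toList := by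
      have hrfl : get_valid_letters g = String.ofList (List.foldl gvlStep [] g.toList) := rfl
      rw [hrfl] at hne
      have h2 := congrArg String.toList hne
      rw [String.toList_ofList] at h2
      simpa using h2
    obtain ⟨hU, hN, -⟩ := (gvl_eq_iff g.toList []).mp hgv
    rw [uniLoop_eq_all g.toList u.toList [] hN (by simp)]
    simp only [List.all_eq_true, decide_eq_true_eq]
    tauto

-- characterization of port B
theorem isvg_alt_true_iff (u g : String) :
    is_valid_guess_alt u g = true ↔
      (g.toList.length = 10 ∧ u.toList.length = 10 ∧
       (∀ c ∈ g.toList, c ∈ "ABCDEFGHIJKLMNOPQRSTUVWXYZ".toList) ∧ g.toList.Nodup ∧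
       ∀ c ∈ g.toList, c ∈ u.toList) := by
  unfold is_valid_guess_alt
  split_ifs with hlen
  · simp only [Bool.false_eq_true, false_iff]; tauto
  · push_neg at hlen
    obtain ⟨hg, hu⟩ := hlen
    simp only [Bool.and_eq_true, List.all_eq_true, decide_eq_true_eq, beq_iff_eq,
      PySem.Set.issubset_iff]
    constructor
    · rintro ⟨⟨hU, hlenset⟩, hsub⟩
      refine ⟨hg, hu, hU, ?_, ?_⟩
      · apply setfold_len_eq g.toList []
        have h10 : (PySem.Set.ofList g.toList).length = 10 := by
          have := hlenset
          simp only [PySem.Set.len] at this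
          exact_mod_cast this
        rw [PySem.Set.ofList_eq_foldl] at h10
        rw [h10]; simp [hg]
      · intro c hc
        have := hsub c ((PySem.Set.mem_ofList g.toList c).mpr hc)
        exact (PySem.Set.mem_ofList u.toList c).mp this
    · rintro ⟨-, -, hU, hN, hsub⟩
      refine ⟨⟨hU, ?_⟩, ?_⟩
      · rw [PySem.Set.ofList_eq_self_of_nodup g.toList hN]
        simp only [PySem.Set.len, hg]
        rfl
      · intro c hc
        exact (PySem.Set.mem_ofList u.toList c).mpr
          (hsub c ((PySem.Set.mem_ofList g.toList c).mp hc))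

-- ===== VERDICT (by name: the statement is the Claim_ definition above) =====
theorem is_valid_guess_spec : Claim_equal_is_valid_guess := by
  intro u g _
  show is_valid_guess u g = is_valid_guess_alt u g
  have h := (isvg_true_iff u g).trans (isvg_alt_true_iff u g).symm
  cases hab : is_valid_guess u g with
  | true => exact (h.mp hab).symm
  | false =>
    cases hbb : is_valid_guess_alt u g with
    | true => exact absurd (h.mpr hbb) (by rw [hab]; simp)
    | false => rfl
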